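-- pv_equiv track=rewrite | github.com/Luqih/MIT-6.00.2x | week1/bruteforce.py | ternary
-- ===== SOURCE A (Python) =====
-- def ternary (n, size):
--   if n == 0:
--     end = '0'
--     while (len(end) < size):
--       end = '0' + end
--     return end
--   nums = []
--   while n:
--     n, r = divmod(n, 3)
--     nums.append(str(r))
--   end = ''.join(reversed(nums))
--   while (len(end) < size):
--     end = '0' + end
--   return end
-- ===== SOURCE B (Python) =====
-- def ternary(n, size):
--     # MSB-first: find the digit width p (least p >= 1 with 3**p > n), then emit the p
--     # digits from the highest power of 3 down, maintaining the power by q //= 3;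
--     # leading zeros come from string repetition, so no reversal and no n==0 branch.
--     p = 1
--     while 3 ** p <= n:
--         p += 1
--     digits = []
--     q = 3 ** (p - 1)
--     for _ in range(p):
--         digits.append(str((n // q) % 3))
--         q //= 3
--     return '0' * (size - p) + ''.join(digits)
-- ===== Notes on version B (the rewrite author's own statement) =====
-- stated objective: faster
-- what changed: Instead of collecting base-3 digits LSB-first with divmod, reversing, and padding by repeatedly prepending '0', B computes the digit width p from powers of 3 and emits the digits MSB-first as (n // q) % 3 with q walking down from 3**(p-1), padding with a single '0'*(size-p) string, so reversal, the prepend loop and the n==0 special case disappear.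
import Mathlib
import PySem

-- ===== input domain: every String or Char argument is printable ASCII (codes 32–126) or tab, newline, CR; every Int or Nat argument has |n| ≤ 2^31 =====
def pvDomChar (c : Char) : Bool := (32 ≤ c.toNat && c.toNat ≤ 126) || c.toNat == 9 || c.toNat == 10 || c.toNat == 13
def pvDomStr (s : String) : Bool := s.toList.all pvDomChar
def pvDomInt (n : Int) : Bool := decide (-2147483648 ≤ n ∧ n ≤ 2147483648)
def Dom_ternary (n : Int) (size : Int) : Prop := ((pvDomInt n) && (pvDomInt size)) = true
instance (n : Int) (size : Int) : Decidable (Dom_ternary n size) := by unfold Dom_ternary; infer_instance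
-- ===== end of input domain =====

-- B builds the base-3 string MSB-first from powers of 3 with one-shot padding instead of A's
-- LSB-first divmod list with reversal and char-by-char prepend padding; measurably faster on
-- large size (A's prepend loop is quadratic in the pad width).

-- ===== PORT A =====
-- A's digit loop `while n: n, r = divmod(n, 3); nums.append(str(r))`; strings are kept as
-- List Char via PySem.Chars/PySem.Int.toChars (exact code-point form of Python str).
-- The guard is written `0 < n`: identical to Python's `n != 0` on every input admitted by
-- Pre_ternary (0 ≤ n); on n < 0 the Python loop never terminates.
def pvDigitsA (n : Int) (nums : List (List Char)) : List (List Char) :=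
  if _h : 0 < n then
    pvDigitsA (PySem.Int.floordiv n 3) (nums ++ [PySem.Int.toChars (PySem.Int.mod n 3)])
  else nums
termination_by n.toNat
decreasing_by
  rw [PySem.Int.floordiv_eq_ediv_of_pos (by norm_num)]
  omega

-- A's padding loop `while len(end) < size: end = '0' + end`
def pvPadA (e : List Char) (size : Int) : List Char :=
  if _h : PySem.List.len e < size then pvPadA ('0' :: e) size else e
termination_by (size - e.length).toNat
decreasing_by
  simp only [PySem.List.len_eq] at _h
  simp only [List.length_cons]
  omega

def ternary (n : Int) (size : Int) : String :=
  if n = 0 then String.ofList (pvPadA ['0'] size)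
  else String.ofList (pvPadA (PySem.Chars.join [] (List.reverse (pvDigitsA n []))) size)

-- ===== PORT B =====
-- B's width loop `p = 1; while 3 ** p <= n: p += 1` (p is a nonnegative counter, kept as Nat)
def pvWidthB (n : Int) (p : Nat) : Nat :=
  if _h : (3 : Int) ^ p ≤ n then pvWidthB n (p + 1) else p
termination_by (n + 1 - 3 ^ p).toNat
decreasing_by
  have h1 : (1 : Int) ≤ 3 ^ p := one_le_pow₀ (by norm_num)
  have h2 : (3 : Int) ^ (p + 1) = 3 ^ p * 3 := pow_succ 3 p
  omega

-- B's digit loop `for _ in range(p): digits.append(str((n // q) % 3)); q //= 3`,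
-- structural recursion on the loop counter, state (q, emitted digits)
def pvEmitB (n : Int) (q : Int) : Nat → List (List Char)
  | 0 => []
  | fuel + 1 =>
    PySem.Int.toChars (PySem.Int.mod (PySem.Int.floordiv n q) 3)
      :: pvEmitB n (PySem.Int.floordiv q 3) fuel

-- `'0' * (size - p)` is List.replicate (size - p).toNat '0' (Python: a nonpositive
-- repeat count gives ''), then the joined digits are appended
def ternary_alt (n : Int) (size : Int) : String :=
  let p := pvWidthB n 1
  String.ofList (List.replicate ((size - (p : Int)).toNat) '0'
    ++ PySem.Chars.join [] (pvEmitB n ((3 : Int) ^ (p - 1)) p))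

-- ===== PRECONDITION & SPEC =====
-- Pre_ excludes n < 0, on which A's divmod loop never terminates: a negative n stays negative
-- under Python's floor division by 3, so `while n:` never exits.
def Pre_ternary (n : Int) (size : Int) : Prop := 0 ≤ n
instance (n : Int) (size : Int) : Decidable (Pre_ternary n size) := by unfold Pre_ternary; infer_instance
def pvWitness_ternary : Int × Int := (5, 6)

def Spec_ternary (n : Int) (size : Int) (out : String) : Prop := out = ternary_alt n size
instance (n : Int) (size : Int) (out : String) : Decidable (Spec_ternary n size out) := by unfold Spec_ternary; infer_instance

-- ===== CLAIM (what is proved, stated in full; the proofs are below) =====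
def Claim_equal_ternary : Prop := ∀ (n : Int) (size : Int), Dom_ternary n size → Pre_ternary n size → Spec_ternary n size (ternary n size)

-- ===== LEMMAS AND PROOFS =====

-- one digit string, exponent k (proof-side helpers)
def pvCh (n : Int) (k : Nat) : List Char :=
  PySem.Int.toChars (PySem.Int.mod (PySem.Int.floordiv n ((3 : Int) ^ k)) 3)

-- the MSB-first digit-string list of width c
def pvRR (n : Int) (c : Nat) : List (List Char) :=
  (List.range c).map (fun j => pvCh n (c - 1 - j))

-- accumulator lemma
theorem pvDigitsA_acc : ∀ (m : Nat) (n : Int), n.toNat = m → ∀ nums, pvDigitsA n nums = nums ++ pvDigitsA n [] := by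
  intro m
  induction m using Nat.strong_induction_on with
  | _ m ih =>
    intro n hm nums
    rw [pvDigitsA]
    conv_rhs => rw [pvDigitsA]
    by_cases h : 0 < n
    · simp only [h, dif_pos]
      have hlt : (PySem.Int.floordiv n 3).toNat < m := by
        rw [PySem.Int.floordiv_eq_ediv_of_pos (by norm_num)]; omega
      rw [ih _ hlt _ rfl (nums ++ [PySem.Int.toChars (PySem.Int.mod n 3)]),
          ih _ hlt _ rfl ([] ++ [PySem.Int.toChars (PySem.Int.mod n 3)])]
      simp
    · simp [h]

theorem pvDigitsA_cons {n : Int} (h : 0 < n) :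
    pvDigitsA n [] = PySem.Int.toChars (PySem.Int.mod n 3) :: pvDigitsA (PySem.Int.floordiv n 3) [] := by
  rw [pvDigitsA]
  simp only [h, dif_pos, List.nil_append]
  rw [pvDigitsA_acc _ _ rfl]
  rfl

theorem pvDigitsA_zero : pvDigitsA 0 [] = [] := by rw [pvDigitsA]; simp

-- pvCh rewritten through ediv/emod
theorem pvCh_eq (n : Int) (k : Nat) :
    pvCh n k = PySem.Int.toChars (n / 3 ^ k % 3) := by
  unfold pvCh
  rw [PySem.Int.floordiv_eq_ediv_of_pos (by positivity),
      PySem.Int.mod_eq_emod_of_pos (by norm_num)]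

theorem pvCh_shift {n : Int} (_hn : 0 ≤ n) (k : Nat) :
    pvCh n (k + 1) = pvCh (PySem.Int.floordiv n 3) k := by
  rw [pvCh_eq, pvCh_eq, PySem.Int.floordiv_eq_ediv_of_pos (by norm_num)]
  rw [show (3:Int)^(k+1) = 3 * 3^k by ring, ← Int.ediv_ediv_of_nonneg (by norm_num : (0:Int) ≤ 3)]

theorem pvCh_top {n : Int} {c k : Nat} (hn : 0 ≤ n) (hub : n < 3 ^ c) (hck : c ≤ k) :
    pvCh n k = ['0'] := by
  rw [pvCh_eq]
  have : n / 3 ^ k = 0 := by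
    apply Int.ediv_eq_zero_of_lt hn
    calc n < 3 ^ c := hub
    _ ≤ 3 ^ k := by exact_mod_cast pow_le_pow_right₀ (by norm_num : (1:Int) ≤ 3) hck
  rw [this]
  rfl

theorem pvCh_zero_exp {n : Int} : pvCh n 0 = PySem.Int.toChars (PySem.Int.mod n 3) := by
  unfold pvCh
  rw [show ((3:Int)^(0:Nat)) = 1 by norm_num, PySem.Int.floordiv_eq_ediv_of_pos (by norm_num), Int.ediv_one]

theorem pvRR_succ (n : Int) (c : Nat) : pvRR n (c + 1) = pvCh n c :: pvRR n c := by
  unfold pvRR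
  rw [List.range_succ_eq_map, List.map_cons, List.map_map]
  have h0 : c + 1 - 1 - 0 = c := by omega
  rw [h0]
  congr 1
  apply List.map_congr_left
  intro j _
  simp only [Function.comp_apply]
  congr 1
  omega

theorem pvRR_shift {n : Int} (hn : 0 ≤ n) (c : Nat) :
    pvRR n (c + 1) = pvRR (PySem.Int.floordiv n 3) c ++ [pvCh n 0] := by
  unfold pvRR
  rw [List.range_succ, List.map_append, List.map_singleton]
  congr 1
  · apply List.map_congr_left
    intro j hj
    rw [List.mem_range] at hj
    rw [show c + 1 - 1 - j = (c - 1 - j) + 1 by omega, pvCh_shift hn]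
  · rw [show c + 1 - 1 - c = 0 by omega]

-- upper bound: n < 3 ^ (number of digits A produces)
theorem pvDigitsA_ub : ∀ (m : Nat) (n : Int), n.toNat = m → 0 ≤ n →
    n < 3 ^ (pvDigitsA n []).length := by
  intro m
  induction m using Nat.strong_induction_on with
  | _ m ih =>
    intro n hm hn
    by_cases h : 0 < n
    · rw [pvDigitsA_cons h, List.length_cons]
      have he : PySem.Int.floordiv n 3 = n / 3 := PySem.Int.floordiv_eq_ediv_of_pos (by norm_num)
      have hlt : (PySem.Int.floordiv n 3).toNat < m := by rw [he]; omega
      have ihh := ih _ hlt (PySem.Int.floordiv n 3) rfl (by rw [he]; omega)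
      rw [he] at ihh
      rw [he]
      have h3 : (3:Int) ^ ((pvDigitsA (n / 3) []).length + 1)
          = 3 * 3 ^ (pvDigitsA (n / 3) []).length := by ring
      rw [h3]
      omega
    · have hn0 : n = 0 := by omega
      subst hn0
      rw [pvDigitsA_zero]
      norm_num

-- lower bound for positive n
theorem pvDigitsA_lb : ∀ (m : Nat) (n : Int), n.toNat = m → 0 < n →
    3 ^ ((pvDigitsA n []).length - 1) ≤ n := by
  intro m
  induction m using Nat.strong_induction_on with
  | _ m ih =>
    intro n hm hn
    rw [pvDigitsA_cons hn, List.length_cons]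
    have he : PySem.Int.floordiv n 3 = n / 3 := PySem.Int.floordiv_eq_ediv_of_pos (by norm_num)
    by_cases h : 0 < PySem.Int.floordiv n 3
    · have hlt : (PySem.Int.floordiv n 3).toNat < m := by rw [he] at h ⊢; omega
      have ihh := ih _ hlt (PySem.Int.floordiv n 3) rfl h
      obtain ⟨L, hL⟩ : ∃ L, (pvDigitsA (PySem.Int.floordiv n 3) []).length = L + 1 := by
        rw [pvDigitsA_cons h, List.length_cons]; exact ⟨_, rfl⟩
      rw [hL] at ihh ⊢
      simp only [Nat.add_sub_cancel] at ihh ⊢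
      have h3 : (3:Int) ^ (L + 1) = 3 * 3 ^ L := by ring
      rw [he] at ihh
      omega
    · have h0 : PySem.Int.floordiv n 3 = 0 := by rw [he] at h ⊢; omega
      rw [h0, pvDigitsA_zero]
      simp
      omega

-- KEY: A's reversed digit list, zero-padded to width c, is the MSB-first list
theorem pvKey : ∀ (c : Nat) (n : Int), 0 ≤ n → n < 3 ^ c →
    List.replicate (c - (pvDigitsA n []).length) ['0'] ++ (pvDigitsA n []).reverse = pvRR n c := by
  intro c
  induction c with
  | zero =>
    intro n hn hub
    have : n = 0 := by norm_num at hub; omega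
    subst this
    rw [pvDigitsA_zero]
    rfl
  | succ c ihc =>
    intro n hn hub
    by_cases h : 0 < n
    · have he : PySem.Int.floordiv n 3 = n / 3 := PySem.Int.floordiv_eq_ediv_of_pos (by norm_num)
      have hub' : PySem.Int.floordiv n 3 < 3 ^ c := by
        have h3 : (3:Int) ^ (c + 1) = 3 * 3 ^ c := by ring
        rw [he]; omega
      have hn' : 0 ≤ PySem.Int.floordiv n 3 := by rw [he]; omega
      have ihh := ihc (PySem.Int.floordiv n 3) hn' hub'
      rw [pvDigitsA_cons h, List.length_cons, List.reverse_cons, pvRR_shift hn,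
          show (c + 1) - ((pvDigitsA (PySem.Int.floordiv n 3) []).length + 1)
             = c - (pvDigitsA (PySem.Int.floordiv n 3) []).length by omega,
          ← List.append_assoc, ihh, pvCh_zero_exp]
    · have hn0 : n = 0 := by omega
      subst hn0
      have ihh := ihc 0 le_rfl (by positivity)
      rw [pvDigitsA_zero] at ihh ⊢
      rw [pvRR_succ, pvCh_top le_rfl (show (0:Int) < 3 ^ 0 by norm_num) (Nat.zero_le c), ← ihh]
      simp [List.replicate_succ]

-- pvWidthB reaches d, the unique width with 3^(d-1) ≤ n < 3^d
theorem pvWidthB_reaches : ∀ (f : Nat) (p d : Nat) (n : Int), d - p = f → 1 ≤ p → p ≤ d →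
    3 ^ (d - 1) ≤ n → n < 3 ^ d → pvWidthB n p = d := by
  intro f
  induction f with
  | zero =>
    intro p d n hf _ _ _ hub
    have : p = d := by omega
    subst this
    rw [pvWidthB]
    have hnle : ¬ ((3:Int) ^ p ≤ n) := by omega
    simp [hnle]
  | succ f ihf =>
    intro p d n hf hp hpd hlb hub
    have hple : (3:Int) ^ p ≤ n := by
      calc (3:Int) ^ p ≤ 3 ^ (d - 1) := by
            exact_mod_cast pow_le_pow_right₀ (by norm_num : (1:Int) ≤ 3) (by omega)
      _ ≤ n := hlb
    rw [pvWidthB]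
    simp only [hple, dif_pos]
    exact ihf (p + 1) d n (by omega) (by omega) (by omega) hlb hub

theorem pvWidthB_zero : pvWidthB 0 1 = 1 := by
  rw [pvWidthB]
  norm_num

-- padding loop = replicate of '0' in front
theorem pvPadA_eq : ∀ (f : Nat) (e : List Char) (size : Int), (size - e.length).toNat = f →
    pvPadA e size = List.replicate (size - e.length).toNat '0' ++ e := by
  intro f
  induction f with
  | zero =>
    intro e size hf
    rw [pvPadA]
    have hnlt : ¬ (PySem.List.len e < size) := by simp only [PySem.List.len_eq]; omega
    rw [dif_neg hnlt, hf]
    simp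
  | succ f ihf =>
    intro e size hf
    rw [pvPadA]
    have hlt : PySem.List.len e < size := by simp only [PySem.List.len_eq]; omega
    simp only [hlt, dif_pos]
    rw [ihf ('0' :: e) size (by simp; omega)]
    rw [show (size - ((('0' :: e) : List Char)).length).toNat = f by simp; omega,
        show (size - (e.length : Int)).toNat = f + 1 by omega,
        List.replicate_succ']
    simp

-- each digit string is one char
theorem pvCh_singleton {n : Int} (hn : 0 ≤ n) (k : Nat) :
    pvCh n k = [(pvCh n k).headD '0'] := by
  rw [pvCh_eq]
  have h1 : 0 ≤ n / 3 ^ k % 3 := Int.emod_nonneg _ (by norm_num)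
  have h2 : n / 3 ^ k % 3 < 3 := Int.emod_lt_of_pos _ (by norm_num)
  set v := n / 3 ^ k % 3 with hv
  have : v = 0 ∨ v = 1 ∨ v = 2 := by omega
  rcases this with h | h | h <;> rw [h] <;> rfl

-- join over the MSB list is the char list; its length is c
theorem pvRR_join (n : Int) (hn : 0 ≤ n) (c : Nat) :
    PySem.Chars.join [] (pvRR n c)
      = (List.range c).map (fun j => (pvCh n (c - 1 - j)).headD '0') := by
  have hmap : pvRR n c = ((List.range c).map (fun j => (pvCh n (c - 1 - j)).headD '0')).map (fun ch => [ch]) := by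
    unfold pvRR
    rw [List.map_map]
    apply List.map_congr_left
    intro j _
    exact pvCh_singleton hn _
  rw [hmap, PySem.Chars.join_nil_singletons]

theorem pvEmitB_eq (n : Int) : ∀ (c : Nat), pvEmitB n ((3 : Int) ^ c) (c + 1) = pvRR n (c + 1) := by
  intro c
  induction c with
  | zero =>
    show _ = pvRR n 1
    unfold pvEmitB pvEmitB pvRR pvCh
    norm_num
  | succ c ihc =>
    show pvEmitB n ((3 : Int) ^ (c + 1)) ((c + 1) + 1) = _
    unfold pvEmitB
    have hq : PySem.Int.floordiv ((3:Int) ^ (c + 1)) 3 = (3:Int) ^ c := by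
      rw [PySem.Int.floordiv_eq_ediv_of_pos (by norm_num), pow_succ]
      exact Int.mul_ediv_cancel _ (by norm_num)
    rw [hq, ihc]
    conv_rhs => rw [pvRR_succ]
    rfl

theorem pvMain : ∀ (n : Int) (size : Int), Pre_ternary n size → Spec_ternary n size (ternary n size) := by
  intro n size hpre
  unfold Pre_ternary at hpre
  unfold Spec_ternary ternary ternary_alt
  simp only []
  by_cases h0 : n = 0
  · subst h0
    rw [if_pos rfl, pvWidthB_zero, pvPadA_eq _ _ _ rfl]
    norm_num
    decide
  · have hpos : 0 < n := by omega
    rw [if_neg h0]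
    have hd1 : 1 ≤ (pvDigitsA n []).length := by
      rw [pvDigitsA_cons hpos, List.length_cons]; omega
    have hub := pvDigitsA_ub _ n rfl hpre
    have hlb := pvDigitsA_lb _ n rfl hpos
    set d := (pvDigitsA n []).length with hd
    have hw : pvWidthB n 1 = d := pvWidthB_reaches (d - 1) 1 d n (by omega) le_rfl hd1 hlb hub
    rw [hw]
    have hkey := pvKey d n hpre hub
    rw [Nat.sub_self, List.replicate_zero, List.nil_append] at hkey
    obtain ⟨c, hc⟩ : ∃ c, d = c + 1 := ⟨d - 1, by omega⟩
    rw [hkey, hc]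
    simp only [Nat.add_sub_cancel]
    rw [pvEmitB_eq n c, ← hc]
    rw [pvRR_join n hpre d, pvPadA_eq _ _ _ rfl]
    congr 2
    simp

-- ===== VERDICT (by name: the statement is the Claim_ definition above) =====
theorem ternary_spec : Claim_equal_ternary := by
  intro n size _hdom hpre
  exact pvMain n size hpre
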